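-- pv_equiv track=rewrite | github.com/TARDIInsanity/rambling_06 | rambling_06_pyc_importless.py | get_sign_ops
-- ===== SOURCE A (Python) =====
-- def get_sign_ops(code:str) -> (list, str):
--     '''retrieve the condensed operation code for a series of unary operands'''
--     operations = []
--     clen = len(code)
--     i = 0
--     while i < clen and code[i] in "+-~":
--         sign = 1
--         while i < clen and code[i] in "+-":
--             if code[i] == "-":
--                 sign *= -1
--             i += 1
--         if sign == -1:
--             operations.append(-1)
--         sign = 1
--         while i < clen and code[i] == "~":
--             sign ^= 1
--             i += 1
--         if sign == 0:
--             operations.append(0)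
--     return (operations, code[i:])
-- ===== SOURCE B (Python) =====
-- def _take_run(s, chars):
--     n = 0
--     while n < len(s) and s[n] in chars:
--         n += 1
--     return s[:n], s[n:]
--
-- def get_sign_ops(code):
--     '''retrieve the condensed operation code for a series of unary operands'''
--     prefix, rest = _take_run(code, "+-~")
--     ops = []
--     while prefix:
--         signs, prefix = _take_run(prefix, "+-")
--         if signs.count("-") % 2:
--             ops.append(-1)
--         tildes, prefix = _take_run(prefix, "~")
--         if len(tildes) % 2:
--             ops.append(0)
--     return (ops, rest)
-- ===== Notes on version B (the rewrite author's own statement) =====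
-- stated objective: simpler
-- what changed: B first splits the leading unary-operator prefix (plus/minus/tilde characters) off the string, then classifies each maximal sign run and tilde run by count parity (odd number of minus signs -> -1, odd run length -> 0), replacing A's index-walking nested while loops with per-character multiply/xor sign accumulators.
import Mathlib
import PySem

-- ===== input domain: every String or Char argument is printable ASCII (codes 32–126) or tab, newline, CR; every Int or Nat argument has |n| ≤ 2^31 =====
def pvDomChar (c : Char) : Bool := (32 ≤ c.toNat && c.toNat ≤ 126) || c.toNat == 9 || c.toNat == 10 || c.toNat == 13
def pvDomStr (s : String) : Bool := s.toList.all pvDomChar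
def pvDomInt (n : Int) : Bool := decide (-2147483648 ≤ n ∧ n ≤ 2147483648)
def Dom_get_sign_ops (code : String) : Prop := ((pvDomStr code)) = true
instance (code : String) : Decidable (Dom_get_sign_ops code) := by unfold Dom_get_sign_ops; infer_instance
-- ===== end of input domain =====

-- B first splits the leading unary-operator prefix (plus/minus/tilde characters) off the string and
-- then classifies each maximal sign run and tilde run by count parity, instead of A's index-walking per-character sign accumulators (objective: simpler).
-- The `fuel` parameters below only make the Python while-loops total in Lean (fuel is always sufficient
-- at the call sites); they are not part of either algorithm.

-- character tests shared by both ports: the three Python membership tests on the operator characters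
def pvIsP (c : Char) : Bool := c == '+' || c == '-' || c == '~'
def pvIsS (c : Char) : Bool := c == '+' || c == '-'
def pvIsT (c : Char) : Bool := c == '~'

-- ===== PORT A =====
-- inner loop `while i < clen and code[i] in "+-": ...` (sign *= -1 on '-')
def aSign (cs : List Char) (clen : Nat) (sign : Int) (i : Nat) : Nat → Int × Nat
  | 0 => (sign, i)
  | fuel + 1 =>
    if i < clen ∧ pvIsS (cs.getD i ' ') then
      aSign cs clen (if cs.getD i ' ' == '-' then sign * (-1) else sign) (i + 1) fuel
    else (sign, i)

-- inner loop `while i < clen and code[i] == "~": sign ^= 1` (sign is only ever 0/1, kept as Nat)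
def aTilde (cs : List Char) (clen : Nat) (sign : Nat) (i : Nat) : Nat → Nat × Nat
  | 0 => (sign, i)
  | fuel + 1 =>
    if i < clen ∧ pvIsT (cs.getD i ' ') then
      aTilde cs clen (sign ^^^ 1) (i + 1) fuel
    else (sign, i)

-- outer loop `while i < clen and code[i] in "+-~": ...`
def aOuter (cs : List Char) (clen : Nat) (ops : List Int) (i : Nat) : Nat → List Int × Nat
  | 0 => (ops, i)
  | fuel + 1 =>
    if i < clen ∧ pvIsP (cs.getD i ' ') then
      let r1 := aSign cs clen 1 i clen
      let ops1 := if r1.1 == -1 then ops ++ [(-1 : Int)] else ops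
      let r2 := aTilde cs clen 1 r1.2 clen
      let ops2 := if r2.1 == 0 then ops1 ++ [(0 : Int)] else ops1
      aOuter cs clen ops2 r2.2 fuel
    else (ops, i)

def get_sign_ops (code : String) : List Int × String :=
  let cs := code.toList
  let clen := cs.length
  let r := aOuter cs clen [] 0 clen
  -- code[i:] with 0 ≤ i ≤ len is exactly List.drop i
  (r.1, String.ofList (cs.drop r.2))

-- ===== PORT B =====
-- B's group loop over the "+-~" prefix: peel one maximal "+-" run and one maximal "~" run,
-- classify each by count parity ('-'-count odd -> -1, run length odd -> 0).
def bLoop : Nat → List Char → List Int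
  | 0, _ => []
  | _ + 1, [] => []
  | fuel + 1, c :: rest =>
      let signs := (c :: rest).takeWhile pvIsS
      let rest1 := (c :: rest).dropWhile pvIsS
      let tildes := rest1.takeWhile pvIsT
      let rest2 := rest1.dropWhile pvIsT
      (if signs.count '-' % 2 == 1 then [(-1 : Int)] else []) ++
      (if tildes.length % 2 == 1 then [(0 : Int)] else []) ++ bLoop fuel rest2

def get_sign_ops_alt (code : String) : List Int × String :=
  let cs := code.toList
  let pre := cs.takeWhile pvIsP
  let rest := cs.dropWhile pvIsP
  (bLoop pre.length pre, String.ofList rest)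

-- ===== PRECONDITION & SPEC =====
def Spec_get_sign_ops (code : String) (out : List Int × String) : Prop := out = get_sign_ops_alt code
instance (code : String) (out : List Int × String) : Decidable (Spec_get_sign_ops code out) := by unfold Spec_get_sign_ops; infer_instance

-- ===== CLAIM (what is proved, stated in full; the proofs are below) =====
def Claim_equal_get_sign_ops : Prop := ∀ (code : String), Dom_get_sign_ops code → Spec_get_sign_ops code (get_sign_ops code)

-- ===== LEMMAS AND PROOFS =====

theorem pvIsS_imp_P (c : Char) (h : pvIsS c = true) : pvIsP c = true := by
  simp only [pvIsP, pvIsS] at *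
  rcases Bool.or_eq_true_iff.mp h with h | h <;> simp [h]

theorem pvIsT_imp_P (c : Char) (h : pvIsT c = true) : pvIsP c = true := by
  simp only [pvIsP, pvIsT] at *; simp [h]

theorem pvP_not_S_T (c : Char) (hp : pvIsP c = true) (hs : pvIsS c = false) : pvIsT c = true := by
  simp only [pvIsP, pvIsS, pvIsT] at *
  rcases Bool.or_eq_true_iff.mp hp with h | h
  · exact absurd h (by simp [hs])
  · exact h

theorem dropWhile_lt_of_takeWhile_ne {α : Type} (p : α → Bool) (l : List α)
    (h : l.takeWhile p ≠ []) : (l.dropWhile p).length < l.length := by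
  cases l with
  | nil => simp at h
  | cons c t =>
    by_cases hc : p c
    · simp only [List.dropWhile_cons_of_pos hc, List.length_cons]
      exact Nat.lt_succ_of_le (List.length_dropWhile_le p t)
    · rw [List.takeWhile_cons_of_neg (by simp [hc])] at h
      exact absurd rfl h

theorem dropWhile_eq_drop_takeWhile {α : Type} (p : α → Bool) (l : List α) :
    l.dropWhile p = l.drop (l.takeWhile p).length := by
  induction l with
  | nil => rfl
  | cons c t ih => by_cases h : p c <;> simp [h, ih]

-- B's group loop always returns [] when the head is outside both run alphabets
theorem bLoop_stuck (f : Nat) : ∀ (c : Char) (rest : List Char),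
    pvIsS c = false → pvIsT c = false → bLoop f (c :: rest) = [] := by
  induction f with
  | zero => intro c rest _ _; rfl
  | succ f IH =>
    intro c rest hs ht
    show _ ++ _ ++ bLoop f _ = _
    rw [List.takeWhile_cons_of_neg (by simp [hs]), List.dropWhile_cons_of_neg (by simp [hs]),
      List.takeWhile_cons_of_neg (by simp [ht]), List.dropWhile_cons_of_neg (by simp [ht])]
    simp [IH c rest hs ht]

-- bLoop ignores the exact amount of fuel as long as it is sufficient
theorem bLoop_fuel (f : Nat) : ∀ (g : Nat) (pre : List Char),
    pre.length ≤ f → pre.length ≤ g → bLoop f pre = bLoop g pre := by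
  induction f with
  | zero =>
    intro g pre hf _
    have : pre = [] := List.eq_nil_of_length_eq_zero (by omega)
    subst this
    cases g <;> rfl
  | succ f IH =>
    intro g pre hf hg
    cases pre with
    | nil => cases g <;> rfl
    | cons c rest =>
      cases g with
      | zero => simp at hg
      | succ g =>
        simp only [List.length_cons] at hf hg
        show _ ++ _ ++ bLoop f (((c :: rest).dropWhile pvIsS).dropWhile pvIsT)
            = _ ++ _ ++ bLoop g (((c :: rest).dropWhile pvIsS).dropWhile pvIsT)
        congr 1
        by_cases hs : pvIsS c
        · have h3 : ((c :: rest).dropWhile pvIsS).length < (c :: rest).length :=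
            dropWhile_lt_of_takeWhile_ne pvIsS (c :: rest)
              (by rw [List.takeWhile_cons_of_pos hs]; simp)
          have h2 := List.length_dropWhile_le pvIsT ((c :: rest).dropWhile pvIsS)
          simp only [List.length_cons] at h3
          exact IH g _ (by omega) (by omega)
        · have hsf : pvIsS c = false := by
            cases hq : pvIsS c
            · rfl
            · exact absurd hq hs
          have hd1 : (c :: rest).dropWhile pvIsS = c :: rest :=
            List.dropWhile_cons_of_neg (by simp [hsf])
          by_cases ht : pvIsT c
          · have h4 : ((c :: rest).dropWhile pvIsT).length < (c :: rest).length :=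
              dropWhile_lt_of_takeWhile_ne pvIsT (c :: rest)
                (by rw [List.takeWhile_cons_of_pos ht]; simp)
            simp only [List.length_cons] at h4
            rw [hd1]
            exact IH g _ (by omega) (by omega)
          · have htf : pvIsT c = false := by
              cases hq : pvIsT c
              · rfl
              · exact absurd hq ht
            have hd2 : (c :: rest).dropWhile pvIsT = c :: rest :=
              List.dropWhile_cons_of_neg (by simp [htf])
            rw [hd1, hd2, bLoop_stuck f c rest hsf htf, bLoop_stuck g c rest hsf htf]

theorem aSign_spec (cs : List Char) : ∀ (fuel : Nat) (sign : Int) (i : Nat),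
    cs.length - i ≤ fuel →
    aSign cs cs.length sign i fuel =
      (sign * (-1) ^ (((cs.drop i).takeWhile pvIsS).count '-'),
       i + ((cs.drop i).takeWhile pvIsS).length) := by
  intro fuel
  induction fuel with
  | zero =>
    intro sign i hle
    rw [List.drop_eq_nil_of_le (by omega)]
    simp [aSign]
  | succ fuel IH =>
    intro sign i hle
    by_cases h : i < cs.length ∧ pvIsS (cs.getD i ' ') = true
    · have hg : cs.getD i ' ' = cs[i] := List.getD_eq_getElem cs ' ' h.1
      have hd : cs.drop i = cs[i] :: cs.drop (i + 1) := List.drop_eq_getElem_cons h.1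
      rw [aSign, if_pos h, IH _ (i + 1) (by omega)]
      rw [hd, List.takeWhile_cons_of_pos (by rw [← hg]; exact h.2)]
      simp only [List.count_cons, List.length_cons, Prod.mk.injEq]
      constructor
      · by_cases hm : cs[i] = '-'
        · rw [if_pos (by rw [hg]; exact beq_iff_eq.mpr hm)]
          simp [hm, pow_succ]
        · rw [if_neg (by rw [hg]; simpa using hm)]
          simp [hm]
      · omega
    · rw [aSign, if_neg h]
      by_cases hi : i < cs.length
      · have hg : cs.getD i ' ' = cs[i] := List.getD_eq_getElem cs ' ' hi
        have hd : cs.drop i = cs[i] :: cs.drop (i + 1) := List.drop_eq_getElem_cons hi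
        have hns : pvIsS cs[i] = false := by
          cases hq : pvIsS cs[i]
          · rfl
          · exact absurd ⟨hi, by rw [hg]; exact hq⟩ h
        rw [hd, List.takeWhile_cons_of_neg (by simp [hns])]
        simp
      · rw [List.drop_eq_nil_of_le (by omega)]
        simp

theorem aTilde_spec (cs : List Char) : ∀ (fuel : Nat) (sign : Nat) (i : Nat),
    cs.length - i ≤ fuel →
    aTilde cs cs.length sign i fuel =
      (sign ^^^ (((cs.drop i).takeWhile pvIsT).length % 2),
       i + ((cs.drop i).takeWhile pvIsT).length) := by
  intro fuel
  induction fuel with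
  | zero =>
    intro sign i hle
    rw [List.drop_eq_nil_of_le (by omega)]
    simp [aTilde]
  | succ fuel IH =>
    intro sign i hle
    by_cases h : i < cs.length ∧ pvIsT (cs.getD i ' ') = true
    · have hg : cs.getD i ' ' = cs[i] := List.getD_eq_getElem cs ' ' h.1
      have hd : cs.drop i = cs[i] :: cs.drop (i + 1) := List.drop_eq_getElem_cons h.1
      rw [aTilde, if_pos h, IH _ (i + 1) (by omega)]
      rw [hd, List.takeWhile_cons_of_pos (by rw [← hg]; exact h.2)]
      simp only [List.length_cons, Prod.mk.injEq]
      constructor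
      · rcases Nat.mod_two_eq_zero_or_one ((cs.drop (i + 1)).takeWhile pvIsT).length with hk | hk
        · rw [hk, show (((cs.drop (i + 1)).takeWhile pvIsT).length + 1) % 2 = 1 by omega]
          simp
        · rw [hk, show (((cs.drop (i + 1)).takeWhile pvIsT).length + 1) % 2 = 0 by omega]
          simp
      · omega
    · rw [aTilde, if_neg h]
      by_cases hi : i < cs.length
      · have hg : cs.getD i ' ' = cs[i] := List.getD_eq_getElem cs ' ' hi
        have hd : cs.drop i = cs[i] :: cs.drop (i + 1) := List.drop_eq_getElem_cons hi
        have hns : pvIsT cs[i] = false := by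
          cases hq : pvIsT cs[i]
          · rfl
          · exact absurd ⟨hi, by rw [hg]; exact hq⟩ h
        rw [hd, List.takeWhile_cons_of_neg (by simp [hns])]
        simp
      · rw [List.drop_eq_nil_of_le (by omega)]
        simp

-- takeWhile by a test implying pvIsP is unchanged by first restricting to the pvIsP-prefix
theorem takeWhile_restrict (q : Char → Bool) (himp : ∀ c, q c = true → pvIsP c = true)
    (l : List Char) : (l.takeWhile pvIsP).takeWhile q = l.takeWhile q := by
  rw [List.takeWhile_takeWhile]
  congr 1
  funext a
  by_cases hq : q a
  · simp [hq, himp a hq]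
  · simp [hq]

-- after dropping the pvIsP-prefix, no test implying pvIsP can take anything
theorem takeWhile_dropWhile_nil {α : Type} (p q : α → Bool)
    (himp : ∀ c, q c = true → p c = true) (l : List α) :
    (l.dropWhile p).takeWhile q = [] := by
  induction l with
  | nil => rfl
  | cons c t ih =>
    by_cases hc : p c
    · simpa [List.dropWhile_cons_of_pos hc] using ih
    · rw [List.dropWhile_cons_of_neg (by simp [hc])]
      have hqc : q c = false := by
        cases hq : q c
        · rfl
        · exact absurd (himp c hq) (by simp [hc])
      rw [List.takeWhile_cons_of_neg (by simp [hqc])]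

-- one unfolding of B's group loop on a non-empty list with fuel to spare
theorem bLoop_cons (fuel : Nat) (c : Char) (rest : List Char) :
    bLoop (fuel + 1) (c :: rest) =
      (if ((c :: rest).takeWhile pvIsS).count '-' % 2 == 1 then [(-1 : Int)] else []) ++
      (if (((c :: rest).dropWhile pvIsS).takeWhile pvIsT).length % 2 == 1 then [(0 : Int)] else []) ++
      bLoop fuel (((c :: rest).dropWhile pvIsS).dropWhile pvIsT) := rfl

theorem aOuter_spec_aux (cs : List Char) : ∀ (fuel : Nat) (i : Nat) (ops : List Int),
    cs.length - i ≤ fuel →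
    aOuter cs cs.length ops i fuel =
      (ops ++ bLoop ((cs.drop i).takeWhile pvIsP).length ((cs.drop i).takeWhile pvIsP),
       i + ((cs.drop i).takeWhile pvIsP).length) := by
  intro fuel
  induction fuel with
  | zero =>
    intro i ops hle
    rw [List.drop_eq_nil_of_le (by omega)]
    simp [aOuter, bLoop]
  | succ fuel IH =>
    intro i ops hle
    by_cases h : i < cs.length ∧ pvIsP (cs.getD i ' ') = true
    · have hg : cs.getD i ' ' = cs[i] := List.getD_eq_getElem cs ' ' h.1
      have hd : cs.drop i = cs[i] :: cs.drop (i + 1) := List.drop_eq_getElem_cons h.1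
      have hiP : pvIsP cs[i] = true := by rw [← hg]; exact h.2
      have hPne : (cs.drop i).takeWhile pvIsP ≠ [] := by
        rw [hd, List.takeWhile_cons_of_pos hiP]; simp
      -- run structure of the pvIsP-prefix
      have keyS : (cs.drop i).takeWhile pvIsS
          = ((cs.drop i).takeWhile pvIsP).takeWhile pvIsS :=
        (takeWhile_restrict pvIsS pvIsS_imp_P (cs.drop i)).symm
      have hRtakeT := takeWhile_dropWhile_nil pvIsP pvIsT pvIsT_imp_P (cs.drop i)
      have hRtakeP := takeWhile_dropWhile_nil pvIsP pvIsP (fun _ hc => hc) (cs.drop i)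
      have hRdropT : ((cs.drop i).dropWhile pvIsP).dropWhile pvIsT = (cs.drop i).dropWhile pvIsP := by
        rw [dropWhile_eq_drop_takeWhile, hRtakeT]; simp
      have hPR : (cs.drop i).takeWhile pvIsP ++ (cs.drop i).dropWhile pvIsP = cs.drop i :=
        List.takeWhile_append_dropWhile
      have hsplit1 : (cs.drop i).dropWhile pvIsS
          = ((cs.drop i).takeWhile pvIsP).dropWhile pvIsS ++ (cs.drop i).dropWhile pvIsP := by
        conv_lhs => rw [← hPR]
        rw [List.dropWhile_append]
        split_ifs with hE
        · rw [List.isEmpty_iff] at hE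
          rw [hE, dropWhile_eq_drop_takeWhile,
            takeWhile_dropWhile_nil pvIsP pvIsS pvIsS_imp_P (cs.drop i)]
          simp
        · rfl
      have keyT : ((cs.drop i).dropWhile pvIsS).takeWhile pvIsT
          = (((cs.drop i).takeWhile pvIsP).dropWhile pvIsS).takeWhile pvIsT := by
        rw [hsplit1, List.takeWhile_append]
        split_ifs with hlen
        · rw [(List.takeWhile_prefix pvIsT).eq_of_length hlen, hRtakeT]
          simp
        · rfl
      have hsplit2 : ((cs.drop i).dropWhile pvIsS).dropWhile pvIsT
          = (((cs.drop i).takeWhile pvIsP).dropWhile pvIsS).dropWhile pvIsT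
            ++ (cs.drop i).dropWhile pvIsP := by
        rw [hsplit1, List.dropWhile_append]
        split_ifs with hE
        · rw [List.isEmpty_iff] at hE
          rw [hE, hRdropT]
          simp
        · rfl
      have keyNext : (((cs.drop i).dropWhile pvIsS).dropWhile pvIsT).takeWhile pvIsP
          = (((cs.drop i).takeWhile pvIsP).dropWhile pvIsS).dropWhile pvIsT := by
        have hall : ∀ x ∈ (((cs.drop i).takeWhile pvIsP).dropWhile pvIsS).dropWhile pvIsT,
            pvIsP x = true := by
          intro x hx
          have hx1 := (List.dropWhile_sublist pvIsT).mem hx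
          have hx2 := (List.dropWhile_sublist pvIsS).mem hx1
          exact List.mem_takeWhile_imp hx2
        rw [hsplit2, List.takeWhile_append, List.takeWhile_eq_self_iff.mpr hall,
          if_pos rfl, hRtakeP]
        simp
      have hlenP : ((cs.drop i).takeWhile pvIsP).length
          = (((cs.drop i).takeWhile pvIsP).takeWhile pvIsS).length
            + ((((cs.drop i).takeWhile pvIsP).dropWhile pvIsS).takeWhile pvIsT).length
            + ((((cs.drop i).takeWhile pvIsP).dropWhile pvIsS).dropWhile pvIsT).length := by
        conv_lhs => rw [← List.takeWhile_append_dropWhile (p := pvIsS)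
          (l := (cs.drop i).takeWhile pvIsP)]
        rw [List.length_append]
        conv_lhs => rw [← List.takeWhile_append_dropWhile (p := pvIsT)
          (l := ((cs.drop i).takeWhile pvIsP).dropWhile pvIsS)]
        rw [List.length_append]
        omega
      -- evaluate the two inner loops
      rw [aOuter, if_pos h, aSign_spec cs cs.length 1 i (by omega)]
      dsimp only
      have hdropS : cs.drop (i + ((cs.drop i).takeWhile pvIsS).length)
          = (cs.drop i).dropWhile pvIsS := by
        rw [← List.drop_drop, ← dropWhile_eq_drop_takeWhile]
      have e2 : aTilde cs cs.length 1 (i + ((cs.drop i).takeWhile pvIsS).length) cs.length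
          = (1 ^^^ (((cs.drop i).dropWhile pvIsS).takeWhile pvIsT).length % 2,
             i + ((cs.drop i).takeWhile pvIsS).length
               + (((cs.drop i).dropWhile pvIsS).takeWhile pvIsT).length) := by
        rw [aTilde_spec cs cs.length 1 _ (by omega), hdropS]
      rw [e2]
      dsimp only
      -- progress for the recursive call
      have hprog : 1 ≤ ((cs.drop i).takeWhile pvIsS).length
          + (((cs.drop i).dropWhile pvIsS).takeWhile pvIsT).length := by
        by_cases hs : pvIsS cs[i]
        · rw [hd, List.takeWhile_cons_of_pos hs]
          simp only [List.length_cons]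
          omega
        · have hsf : pvIsS cs[i] = false := by
            cases hq : pvIsS cs[i]
            · rfl
            · exact absurd hq hs
          have ht : pvIsT cs[i] = true := pvP_not_S_T cs[i] hiP hsf
          rw [hd, List.dropWhile_cons_of_neg (by simp [hsf]), List.takeWhile_cons_of_pos ht]
          simp only [List.length_cons]
          omega
      have hdropT : cs.drop (i + ((cs.drop i).takeWhile pvIsS).length
            + (((cs.drop i).dropWhile pvIsS).takeWhile pvIsT).length)
          = ((cs.drop i).dropWhile pvIsS).dropWhile pvIsT := by
        rw [← List.drop_drop, hdropS, ← dropWhile_eq_drop_takeWhile]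
      rw [IH _ _ (by omega), hdropT, keyNext]
      -- unfold B's loop on the prefix: it is non-empty, so write it as a cons
      obtain ⟨c0, rest0, hcons⟩ : ∃ c0 rest0, (cs.drop i).takeWhile pvIsP = c0 :: rest0 := by
        cases hq : (cs.drop i).takeWhile pvIsP with
        | nil => exact absurd hq hPne
        | cons a b => exact ⟨a, b, rfl⟩
      have hl0 : ((cs.drop i).takeWhile pvIsP).length = rest0.length + 1 := by
        rw [hcons]; rfl
      have hlenP' := hlenP
      rw [← keyS, ← keyT] at hlenP'
      conv_rhs =>
        rw [hcons, show (c0 :: rest0).length = rest0.length + 1 from rfl,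
          bLoop_cons rest0.length c0 rest0, ← hcons]
      rw [bLoop_fuel ((((cs.drop i).takeWhile pvIsP).dropWhile pvIsS).dropWhile pvIsT).length
        rest0.length _ (le_refl _) (by omega)]
      -- align the two condition tests
      have hcond1 : ((1 : Int) * (-1) ^ (((cs.drop i).takeWhile pvIsS).count '-') == -1)
          = ((((cs.drop i).takeWhile pvIsP).takeWhile pvIsS).count '-' % 2 == 1) := by
        rw [← keyS, one_mul]
        rcases Nat.even_or_odd (((cs.drop i).takeWhile pvIsS).count '-') with he | ho
        · rw [he.neg_one_pow]
          rw [Nat.even_iff] at he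
          simp [he]
        · rw [ho.neg_one_pow]
          rw [Nat.odd_iff] at ho
          simp [ho]
      have hcond2 : ((1 : Nat) ^^^ (((cs.drop i).dropWhile pvIsS).takeWhile pvIsT).length % 2 == 0)
          = (((((cs.drop i).takeWhile pvIsP).dropWhile pvIsS).takeWhile pvIsT).length % 2 == 1) := by
        rw [← keyT]
        rcases Nat.mod_two_eq_zero_or_one (((cs.drop i).dropWhile pvIsS).takeWhile pvIsT).length
          with hk | hk
        · rw [hk]; simp
        · rw [hk]; simp
      rw [hcond1, hcond2]
      refine Prod.ext ?_ ?_
      · dsimp only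
        split_ifs <;> simp
      · dsimp only
        omega
    · rw [aOuter, if_neg h]
      by_cases hi : i < cs.length
      · have hg : cs.getD i ' ' = cs[i] := List.getD_eq_getElem cs ' ' hi
        have hd : cs.drop i = cs[i] :: cs.drop (i + 1) := List.drop_eq_getElem_cons hi
        have hns : pvIsP cs[i] = false := by
          cases hq : pvIsP cs[i]
          · rfl
          · exact absurd ⟨hi, by rw [hg]; exact hq⟩ h
        rw [hd, List.takeWhile_cons_of_neg (by simp [hns])]
        simp [bLoop]
      · rw [List.drop_eq_nil_of_le (by omega)]
        simp [bLoop]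

-- ===== VERDICT (by name: the statement is the Claim_ definition above) =====
theorem get_sign_ops_spec : Claim_equal_get_sign_ops := by
  intro code _
  unfold Spec_get_sign_ops get_sign_ops get_sign_ops_alt
  simp only [aOuter_spec_aux code.toList code.toList.length 0 [] (by omega),
    List.drop_zero, List.nil_append, Nat.zero_add]
  rw [dropWhile_eq_drop_takeWhile]
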